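-- pv_equiv track=rewrite | github.com/eratem/advent_of_code_2023 | day3.py | _find_gear_ratios
-- ===== SOURCE A (Python) =====
-- from dataclasses import dataclass
--
-- @dataclass(frozen=True)
-- class IndexedNumber:
--     start_index: int
--     end_index: int
--     number: int
--
-- def _search_numbers_with_indexes(line: str) -> list[IndexedNumber]:
--     results = []
--     current_number = 0
--     start_index = 0
--     for index, character in enumerate(line):
--         if character.isdigit():
--             if current_number == 0:
--                 start_index = index
--             current_number = current_number * 10 + int(character)
--         elif current_number != 0:
--             results.append(IndexedNumber(start_index - 1, index, current_number))
--             current_number = 0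
--     if current_number != 0:
--         results.append(IndexedNumber(start_index - 1, len(line), current_number))
--     return results
--
-- def _find_gear_ratios(gear_indexes: list[int], frame: list[str]) -> list[int]:
--     gear_ratios = []
--     indexed_number_frame = [_search_numbers_with_indexes(line) for line in frame]
--     found_gear_numbers = []
--     for gear_index in gear_indexes:
--         for line in indexed_number_frame:
--             for indexed_number in line:
--                 if indexed_number.start_index <= gear_index <= indexed_number.end_index:
--                     found_gear_numbers.append(indexed_number.number)
--         if len(found_gear_numbers) == 2:
--             gear_ratios.append(found_gear_numbers[0] * found_gear_numbers[1])
--         found_gear_numbers = []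
--     return gear_ratios
-- ===== SOURCE B (Python) =====
-- def _find_gear_ratios(gear_indexes, frame):
--     # Build a column -> numbers index once (insertion order: line by line, left to right),
--     # then each gear is a single O(1) dictionary lookup.
--     column_index = {}
--     for line in frame:
--         current = 0
--         start = 0
--         for i, ch in enumerate(line):
--             if ch.isdigit():
--                 if current == 0:
--                     start = i
--                 current = current * 10 + int(ch)
--             elif current != 0:
--                 for c in range(start - 1, i + 1):
--                     column_index.setdefault(c, []).append(current)
--                 current = 0
--         if current != 0:
--             for c in range(start - 1, len(line) + 1):
--                 column_index.setdefault(c, []).append(current)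
--     gear_ratios = []
--     for g in gear_indexes:
--         nums = column_index.get(g, [])
--         if len(nums) == 2:
--             gear_ratios.append(nums[0] * nums[1])
--     return gear_ratios
-- ===== Notes on version B (the rewrite author's own statement) =====
-- stated objective: faster
-- what changed: Instead of rescanning every parsed number of the whole frame for each gear index, B builds a column->numbers dictionary once while parsing (each number is registered under every column it touches), so each gear becomes a single O(1) dictionary lookup.
import Mathlib
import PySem

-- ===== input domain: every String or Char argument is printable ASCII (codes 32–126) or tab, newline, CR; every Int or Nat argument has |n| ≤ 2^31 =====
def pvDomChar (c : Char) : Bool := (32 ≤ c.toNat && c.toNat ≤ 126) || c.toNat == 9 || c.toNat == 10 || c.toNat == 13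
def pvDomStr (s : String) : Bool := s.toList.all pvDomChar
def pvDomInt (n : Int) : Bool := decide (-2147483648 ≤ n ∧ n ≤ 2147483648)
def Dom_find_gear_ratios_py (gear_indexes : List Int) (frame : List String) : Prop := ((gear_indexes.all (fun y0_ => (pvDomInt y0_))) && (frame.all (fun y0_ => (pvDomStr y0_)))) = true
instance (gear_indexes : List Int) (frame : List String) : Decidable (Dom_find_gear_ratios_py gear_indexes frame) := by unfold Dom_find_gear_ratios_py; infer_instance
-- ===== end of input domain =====

-- B replaces A's per-gear rescan of every parsed number by a column → numbers index built once,
-- so each gear becomes one dictionary lookup (asymptotically fewer comparisons for many gears).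

-- ===== PORT A =====
-- IndexedNumber(start_index, end_index, number) is the triple (t.1, t.2.1, t.2.2).
-- 'indexed_number.start_index <= gear_index <= indexed_number.end_index' (chained comparison):
def pvHit (g : Int) (t : Int × Int × Int) : Bool := t.1 ≤ g && g ≤ t.2.1

-- loop body of _search_numbers_with_indexes; state = (results, current_number, start_index).
-- int(character) under the isdigit guard is the digit value (exact on the ASCII domain).
def pvStepA (st : List (Int × Int × Int) × Int × Int) (p : Int × Char) :
    List (Int × Int × Int) × Int × Int :=
  if PySem.Chars.isdigit p.2 then
    (st.1, st.2.1 * 10 + ((p.2.toNat : Int) - 48), if st.2.1 == 0 then p.1 else st.2.2)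
  else if st.2.1 ≠ 0 then
    (st.1 ++ [(st.2.2 - 1, p.1, st.2.1)], 0, st.2.2)
  else st

def pvSearchA (line : String) : List (Int × Int × Int) :=
  let st := (PySem.List.enumerate line.toList).foldl pvStepA ([], 0, 0)
  if st.2.1 ≠ 0 then st.1 ++ [(st.2.2 - 1, PySem.Str.len line, st.2.1)] else st.1

def find_gear_ratios_py (gear_indexes : List Int) (frame : List String) : List Int :=
  let indexed_number_frame := frame.map (fun line => pvSearchA line)
  gear_indexes.foldl (fun gear_ratios g =>
    let found := indexed_number_frame.foldl (fun found line =>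
      line.foldl (fun found t => if pvHit g t then found ++ [t.2.2] else found) found) []
    if found.length == 2 then
      gear_ratios ++ [PySem.List.pyGetD found 0 0 * PySem.List.pyGetD found 1 0]
    else gear_ratios) []

-- ===== PORT B =====
-- 'for c in range(lo, hi): column_index.setdefault(c, []).append(n)'
-- (setdefault(c, []).append(n) is exactly Dict.modify c [] (· ++ [n]))
def pvColsAppend (d : PySem.Dict Int (List Int)) (lo hi n : Int) : PySem.Dict Int (List Int) :=
  (PySem.List.pyRange lo hi).foldl (fun d c => d.modify c [] (fun v => v ++ [n])) d

-- loop body of B's fused parse-and-index pass; state = (column_index, current, start).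
def pvStepB (st : PySem.Dict Int (List Int) × Int × Int) (p : Int × Char) :
    PySem.Dict Int (List Int) × Int × Int :=
  if PySem.Chars.isdigit p.2 then
    (st.1, st.2.1 * 10 + ((p.2.toNat : Int) - 48), if st.2.1 == 0 then p.1 else st.2.2)
  else if st.2.1 ≠ 0 then
    (pvColsAppend st.1 (st.2.2 - 1) (p.1 + 1) st.2.1, 0, st.2.2)
  else st

def pvIndexLine (d : PySem.Dict Int (List Int)) (line : String) : PySem.Dict Int (List Int) :=
  let st := (PySem.List.enumerate line.toList).foldl pvStepB (d, 0, 0)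
  if st.2.1 ≠ 0 then pvColsAppend st.1 (st.2.2 - 1) (PySem.Str.len line + 1) st.2.1 else st.1

def find_gear_ratios_py_alt (gear_indexes : List Int) (frame : List String) : List Int :=
  let column_index := frame.foldl pvIndexLine PySem.Dict.empty
  gear_indexes.foldl (fun gear_ratios g =>
    let nums := column_index.getD g []
    if nums.length == 2 then
      gear_ratios ++ [PySem.List.pyGetD nums 0 0 * PySem.List.pyGetD nums 1 0]
    else gear_ratios) []

-- ===== PRECONDITION & SPEC =====
def Spec_find_gear_ratios_py (gear_indexes : List Int) (frame : List String) (out : List Int) : Prop := out = find_gear_ratios_py_alt gear_indexes frame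
instance (gear_indexes : List Int) (frame : List String) (out : List Int) : Decidable (Spec_find_gear_ratios_py gear_indexes frame out) := by unfold Spec_find_gear_ratios_py; infer_instance

-- ===== CLAIM (what is proved, stated in full; the proofs are below) =====
def Claim_equal_find_gear_ratios_py : Prop := ∀ (gear_indexes : List Int) (frame : List String), Dom_find_gear_ratios_py gear_indexes frame → Spec_find_gear_ratios_py gear_indexes frame (find_gear_ratios_py gear_indexes frame)

-- ===== LEMMAS AND PROOFS =====

-- inserting one parsed number (start_index, end_index, number) into the index
def pvInsertAll (d : PySem.Dict Int (List Int)) (nums : List (Int × Int × Int)) :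
    PySem.Dict Int (List Int) :=
  nums.foldl (fun d t => pvColsAppend d t.1 (t.2.1 + 1) t.2.2) d

theorem pv_filter_pyRange (a b g : Int) :
    (PySem.List.pyRange a b).filter (fun c => c == g) = if a ≤ g ∧ g < b then [g] else [] := by
  by_cases hab : a < b
  · rw [PySem.List.pyRange_one_cons hab, List.filter_cons, pv_filter_pyRange (a + 1) b g]
    by_cases hg : a = g
    · subst hg; simp; omega
    · simp [hg]
      split_ifs <;> first | rfl | omega
  · have h0 : PySem.List.pyRange a b = [] := by
      rw [PySem.List.pyRange_of_pos a b (by norm_num)]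
      simp [hab]
    rw [h0]
    simp
    omega
termination_by (b - a).toNat
decreasing_by omega

theorem pv_getD_colsAppend (d : PySem.Dict Int (List Int)) (lo hi n g : Int) :
    (pvColsAppend d lo hi n).getD g [] =
      d.getD g [] ++ (if lo ≤ g ∧ g < hi then [n] else []) := by
  unfold pvColsAppend
  rw [show (List.foldl (fun d c => PySem.Dict.modify d c [] (fun v => v ++ [n])) d
        (PySem.List.pyRange lo hi))
      = (List.foldl (fun d p => PySem.Dict.modify d p.1 [] (fun v => v ++ [p.2])) d
        ((PySem.List.pyRange lo hi).map (fun c => (c, n)))) from by rw [List.foldl_map]]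
  rw [PySem.Dict.getD_foldl_modify_append]
  congr 1
  rw [List.filter_map, List.map_map]
  have : ((fun p => p.1 == g) ∘ fun c => (c, n)) = (fun c => c == g) := rfl
  rw [this, pv_filter_pyRange]
  split_ifs <;> simp

theorem pv_stepA_acc (ps : List (Int × Char)) (res : List (Int × Int × Int)) (cur start : Int) :
    List.foldl pvStepA (res, cur, start) ps =
      (res ++ (List.foldl pvStepA ([], cur, start) ps).1,
       (List.foldl pvStepA ([], cur, start) ps).2) := by
  induction ps generalizing res cur start with
  | nil => simp
  | cons p ps ih =>
    simp only [List.foldl_cons]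
    by_cases h1 : PySem.Chars.isdigit p.2
    · simp only [pvStepA, h1, if_pos]
      exact ih _ _ _
    · by_cases h2 : cur = 0
      · have e1 : ∀ r : List (Int × Int × Int), pvStepA (r, cur, start) p = (r, cur, start) := by
          intro r; simp [pvStepA, h1, h2]
        rw [e1, e1]
        exact ih _ _ _
      · have e1 : ∀ r : List (Int × Int × Int),
            pvStepA (r, cur, start) p = (r ++ [(start - 1, p.1, cur)], 0, start) := by
          intro r; simp [pvStepA, h1, h2]
        rw [e1, e1]
        rw [ih (res ++ [(start - 1, p.1, cur)]) 0 start, ih ([] ++ [(start - 1, p.1, cur)]) 0 start]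
        simp

theorem pv_stepB_fuse (ps : List (Int × Char)) (d : PySem.Dict Int (List Int)) (cur start : Int) :
    List.foldl pvStepB (d, cur, start) ps =
      (pvInsertAll d (List.foldl pvStepA ([], cur, start) ps).1,
       (List.foldl pvStepA ([], cur, start) ps).2) := by
  induction ps generalizing d cur start with
  | nil => simp [pvInsertAll]
  | cons p ps ih =>
    simp only [List.foldl_cons]
    by_cases h1 : PySem.Chars.isdigit p.2
    · simp only [pvStepA, pvStepB, h1, if_pos]
      exact ih _ _ _
    · by_cases h2 : cur = 0
      · have e1 : pvStepB (d, cur, start) p = (d, cur, start) := by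
          simp [pvStepB, h1, h2]
        have e2 : pvStepA (([] : List (Int × Int × Int)), cur, start) p = ([], cur, start) := by
          simp [pvStepA, h1, h2]
        rw [e1, e2]
        exact ih _ _ _
      · have e1 : pvStepB (d, cur, start) p
            = (pvColsAppend d (start - 1) (p.1 + 1) cur, 0, start) := by
          simp [pvStepB, h1, h2]
        have e2 : pvStepA (([] : List (Int × Int × Int)), cur, start) p
            = (([(start - 1, p.1, cur)] : List (Int × Int × Int)), (0 : Int), start) := by
          simp [pvStepA, h1, h2]
        rw [e1, e2]
        rw [ih (pvColsAppend d (start - 1) (p.1 + 1) cur) 0 start,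
            pv_stepA_acc ps ([(start - 1, p.1, cur)]) 0 start]
        simp [pvInsertAll]

theorem pv_indexLine_eq (d : PySem.Dict Int (List Int)) (line : String) :
    pvIndexLine d line = pvInsertAll d (pvSearchA line) := by
  unfold pvIndexLine pvSearchA
  rw [pv_stepB_fuse]
  set st := List.foldl pvStepA ([], 0, 0) (PySem.List.enumerate line.toList) with hst
  by_cases h : st.2.1 = 0
  · simp [h]
  · simp only [h, ne_eq, not_false_eq_true, if_pos]
    unfold pvInsertAll
    rw [List.foldl_append]
    simp

theorem pv_index_eq (frame : List String) (d : PySem.Dict Int (List Int)) :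
    frame.foldl pvIndexLine d = pvInsertAll d (frame.map pvSearchA).flatten := by
  induction frame generalizing d with
  | nil => simp [pvInsertAll]
  | cons line frame ih =>
    simp only [List.foldl_cons, List.map_cons, List.flatten_cons]
    rw [pv_indexLine_eq, ih]
    simp only [pvInsertAll, List.foldl_append]

theorem pv_getD_insertAll (nums : List (Int × Int × Int)) (d : PySem.Dict Int (List Int)) (g : Int) :
    (pvInsertAll d nums).getD g [] =
      d.getD g [] ++ (nums.filter (pvHit g)).map (fun t => t.2.2) := by
  induction nums generalizing d with
  | nil => simp [pvInsertAll]
  | cons t nums ih =>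
    simp only [pvInsertAll, List.foldl_cons, List.filter_cons]
    rw [← pvInsertAll, ih, pv_getD_colsAppend]
    by_cases h : pvHit g t
    · have hc : t.1 ≤ g ∧ g < t.2.1 + 1 := by
        simp [pvHit] at h; omega
      rw [if_pos hc]
      simp [h]
    · have hc : ¬ (t.1 ≤ g ∧ g < t.2.1 + 1) := by
        simp [pvHit] at h
        omega
      rw [if_neg hc]
      simp [h]

theorem pv_found_eq (inf : List (List (Int × Int × Int))) (g : Int) :
    inf.foldl (fun found line =>
        line.foldl (fun found t => if pvHit g t then found ++ [t.2.2] else found) found) [] =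
      (inf.flatten.filter (pvHit g)).map (fun t => t.2.2) := by
  have h : ∀ (acc : List Int),
      inf.foldl (fun found line =>
        line.foldl (fun found t => if pvHit g t then found ++ [t.2.2] else found) found) acc =
      acc ++ (inf.flatten.filter (pvHit g)).map (fun t => t.2.2) := by
    intro acc
    induction inf generalizing acc with
    | nil => simp
    | cons line inf ih =>
      simp only [List.foldl_cons, List.flatten_cons, List.filter_append, List.map_append]
      rw [PySem.List.foldl_append_if, ih]
      simp
  simpa using h []

-- ===== VERDICT (by name: the statement is the Claim_ definition above) =====
theorem find_gear_ratios_py_spec : Claim_equal_find_gear_ratios_py := by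
  intro gear_indexes frame _
  show find_gear_ratios_py gear_indexes frame = find_gear_ratios_py_alt gear_indexes frame
  unfold find_gear_ratios_py find_gear_ratios_py_alt
  rw [pv_index_eq]
  apply List.foldl_ext
  intro acc g _
  rw [pv_found_eq, pv_getD_insertAll]
  simp
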